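-- pv_equiv track=rewrite | github.com/Lu-Chengyu/factory-logistics-package-solutions-evaluation | TLP_Solution_V2.1.py | remove_0
-- ===== SOURCE A (Python) =====
-- def remove_0(Box_Type=[], Num_Boxes=[], Combo=[]):
--     num_box_copy = list.copy(Num_Boxes)
--     for j in range(len(Num_Boxes)):
--         judge = 0
--         for i in range(len(Combo)):
--             if Combo[i][j] == 0:
--                 continue
--             else:
--                 judge = 1
--                 break
--
--         if judge == 0:
--             num_box_copy[j] = 0
--
--     return num_box_copy
-- ===== SOURCE B (Python) =====
-- def remove_0(Box_Type=[], Num_Boxes=[], Combo=[]):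
--     n = len(Num_Boxes)
--     has_nonzero = set()
--     for row in Combo:
--         for j in range(n):
--             if row[j] != 0:
--                 has_nonzero.add(j)
--     return [Num_Boxes[j] if j in has_nonzero else 0 for j in range(n)]
-- ===== Notes on version B (the rewrite author's own statement) =====
-- stated objective: alternative
-- what changed: Replaces the column-outer scan with early break by a single row-major pass that collects the set of columns holding a nonzero entry, then builds the result in one shaped pass zeroing the columns outside that set.
-- outside the precondition, e.g. on remove_0([], [1, 2], [[3, 4], [5]]): A returns [1, 2], B raises IndexError
import Mathlib
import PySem

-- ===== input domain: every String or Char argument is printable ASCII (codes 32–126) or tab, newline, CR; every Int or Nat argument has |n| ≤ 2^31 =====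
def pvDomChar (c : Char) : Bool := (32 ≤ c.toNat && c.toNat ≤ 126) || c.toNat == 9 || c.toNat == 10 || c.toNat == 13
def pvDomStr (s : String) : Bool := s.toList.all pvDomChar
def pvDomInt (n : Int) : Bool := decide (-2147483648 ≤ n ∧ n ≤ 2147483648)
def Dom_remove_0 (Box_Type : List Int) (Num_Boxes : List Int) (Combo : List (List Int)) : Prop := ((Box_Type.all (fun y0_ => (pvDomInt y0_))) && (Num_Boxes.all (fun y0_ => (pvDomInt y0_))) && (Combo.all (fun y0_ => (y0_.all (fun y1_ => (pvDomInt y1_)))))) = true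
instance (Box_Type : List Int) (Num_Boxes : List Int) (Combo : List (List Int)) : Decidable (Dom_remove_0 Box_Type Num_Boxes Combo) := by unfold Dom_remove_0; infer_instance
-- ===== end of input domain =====

-- B replaces A's column-outer early-break scan by a row-major pass collecting the set of
-- nonzero columns plus one shaped output pass; same cost, different decomposition.


-- ===== PORT A =====
-- inner 'for i in range(len(Combo))' loop: returns the final value of 'judge' (break at the first nonzero)
def judgeA (Combo : List (List Int)) (j : Nat) : Int :=
  match Combo with
  | [] => 0
  | row :: rest => if PySem.List.pyGetD row (j : Int) 0 == 0 then judgeA rest j else 1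

def remove_0 (Box_Type : List Int) (Num_Boxes : List Int) (Combo : List (List Int)) : List Int :=
  (List.range Num_Boxes.length).foldl
    (fun num_box_copy j =>
      if judgeA Combo j == 0 then num_box_copy.set j 0 else num_box_copy)
    Num_Boxes

-- ===== PORT B =====
-- row-major pass: the set of column indices j with some Combo[i][j] != 0
def hasNonzero (n : Nat) (Combo : List (List Int)) : PySem.Set Nat :=
  Combo.foldl
    (fun s row =>
      (List.range n).foldl
        (fun s (j : Nat) => if PySem.List.pyGetD row (j : Int) 0 ≠ 0 then PySem.Set.add s j else s)
        s)
    PySem.Set.empty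

def remove_0_alt (Box_Type : List Int) (Num_Boxes : List Int) (Combo : List (List Int)) : List Int :=
  let n := Num_Boxes.length
  let hs := hasNonzero n Combo
  (List.range n).map
    (fun j => if PySem.Set.contains hs j then PySem.List.pyGetD Num_Boxes (j : Int) 0 else 0)

-- ===== PRECONDITION & SPEC =====
-- Pre_ excludes ragged Combo (a row shorter than Num_Boxes): there Python raises IndexError
-- in B's full row-major scan (and in A unless its early break on a nonzero entry happens to
-- skip every out-of-range access, an accident of scan order on which A may still return).
def Pre_remove_0 (Box_Type : List Int) (Num_Boxes : List Int) (Combo : List (List Int)) : Prop :=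
  ∀ row ∈ Combo, Num_Boxes.length ≤ row.length
instance (Box_Type : List Int) (Num_Boxes : List Int) (Combo : List (List Int)) : Decidable (Pre_remove_0 Box_Type Num_Boxes Combo) := by unfold Pre_remove_0; infer_instance

def pvWitness_remove_0 : List Int × List Int × List (List Int) := ([7], [1, 2], [[0, 3], [0, 0]])

def Spec_remove_0 (Box_Type : List Int) (Num_Boxes : List Int) (Combo : List (List Int)) (out : List Int) : Prop := out = remove_0_alt Box_Type Num_Boxes Combo
instance (Box_Type : List Int) (Num_Boxes : List Int) (Combo : List (List Int)) (out : List Int) : Decidable (Spec_remove_0 Box_Type Num_Boxes Combo out) := by unfold Spec_remove_0; infer_instance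

-- ===== CLAIM (what is proved, stated in full; the proofs are below) =====
def Claim_equal_remove_0 : Prop := ∀ (Box_Type : List Int) (Num_Boxes : List Int) (Combo : List (List Int)), Dom_remove_0 Box_Type Num_Boxes Combo → Pre_remove_0 Box_Type Num_Boxes Combo → Spec_remove_0 Box_Type Num_Boxes Combo (remove_0 Box_Type Num_Boxes Combo)

-- ===== LEMMAS AND PROOFS =====

-- characterisation of A's inner loop
theorem judgeA_eq_zero_iff (Combo : List (List Int)) (j : Nat) :
    judgeA Combo j == 0 ↔ ∀ row ∈ Combo, row[j]?.getD 0 = 0 := by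
  induction Combo with
  | nil => simp [judgeA]
  | cons row rest ih =>
    simp only [judgeA, PySem.List.pyGetD_natCast]
    by_cases h : row[j]?.getD 0 = 0 <;> simp [h, ih]

-- A's write loop, pointwise
theorem foldl_set_getElem? (g : Nat → Bool) (l : List Nat) (acc : List Int) (i : Nat) :
    (l.foldl (fun acc j => if g j then acc.set j 0 else acc) acc)[i]? =
      if i ∈ l ∧ g i then (if i < acc.length then some 0 else none) else acc[i]? := by
  induction l generalizing acc with
  | nil => simp
  | cons j l ih =>
    simp only [List.foldl_cons, ih]
    by_cases hg : g j <;> by_cases hij : i = j <;>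
      simp_all [List.getElem?_set, List.getElem?_eq_none_iff] <;>
      split_ifs <;> simp_all [List.getElem?_eq_none_iff] <;> omega

-- membership in B's inner loop, generalised over the index list
theorem mem_inner (row : List Int) (l : List Nat) (s : PySem.Set Nat) (j : Nat) :
    j ∈ l.foldl (fun s (k : Nat) => if PySem.List.pyGetD row (k : Int) 0 ≠ 0 then PySem.Set.add s k else s) s ↔
      j ∈ s ∨ (j ∈ l ∧ row[j]?.getD 0 ≠ 0) := by
  induction l generalizing s with
  | nil => simp
  | cons k l ih =>
    simp only [List.foldl_cons, ih, PySem.List.pyGetD_natCast]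
    by_cases hp : row[k]?.getD 0 = 0 <;> by_cases hjk : j = k <;>
      simp_all [PySem.Set.mem_add]

-- membership in B's collected set
theorem mem_hasNonzero (n : Nat) (Combo : List (List Int)) (j : Nat) :
    j ∈ hasNonzero n Combo ↔ j < n ∧ ∃ row ∈ Combo, row[j]?.getD 0 ≠ 0 := by
  unfold hasNonzero
  suffices h : ∀ s : PySem.Set Nat,
      j ∈ Combo.foldl (fun s row => (List.range n).foldl
        (fun s (k : Nat) => if PySem.List.pyGetD row (k : Int) 0 ≠ 0 then PySem.Set.add s k else s) s) s
      ↔ j ∈ s ∨ (j < n ∧ ∃ row ∈ Combo, row[j]?.getD 0 ≠ 0) by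
    simpa [PySem.Set.empty] using h PySem.Set.empty
  induction Combo with
  | nil => simp
  | cons row rest ih =>
    intro s
    simp only [List.foldl_cons, ih, mem_inner, List.mem_range, List.mem_cons]
    constructor
    · rintro ((h | ⟨h1, h2⟩) | ⟨hn, row', hmem, hnz⟩)
      · exact Or.inl h
      · exact Or.inr ⟨h1, row, Or.inl rfl, h2⟩
      · exact Or.inr ⟨hn, row', Or.inr hmem, hnz⟩
    · rintro (h | ⟨hn, row', hmem, hnz⟩)
      · exact Or.inl (Or.inl h)
      · rcases hmem with rfl | hmem'
        · exact Or.inl (Or.inr ⟨hn, hnz⟩)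
        · exact Or.inr ⟨hn, row', hmem', hnz⟩

-- ===== VERDICT (by name: the statement is the Claim_ definition above) =====
theorem remove_0_spec : Claim_equal_remove_0 := by
  intro Box_Type Num_Boxes Combo _ _
  unfold Spec_remove_0 remove_0 remove_0_alt
  apply List.ext_getElem?
  intro i
  rw [foldl_set_getElem? (fun j => judgeA Combo j == 0) (List.range Num_Boxes.length) Num_Boxes i]
  by_cases hi : i < Num_Boxes.length
  · have hmem : i ∈ List.range Num_Boxes.length := List.mem_range.mpr hi
    by_cases hj : judgeA Combo i == 0
    · have hall := (judgeA_eq_zero_iff Combo i).mp hj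
      have hc : ¬ i ∈ hasNonzero Num_Boxes.length Combo := by
        rw [mem_hasNonzero]; rintro ⟨-, row, hr, hnz⟩; exact hnz (hall row hr)
      simp [hmem, hj, hi, List.getElem?_map, hc, PySem.Set.contains_iff,
        List.getElem?_range hi]
    · have hc : i ∈ hasNonzero Num_Boxes.length Combo := by
        rw [mem_hasNonzero]
        refine ⟨hi, ?_⟩
        by_contra h
        push_neg at h
        exact hj ((judgeA_eq_zero_iff Combo i).mpr (by simpa using h))
      simp [hmem, hj, List.getElem?_map, hc, PySem.Set.contains_iff,
        List.getElem?_range hi, List.getElem?_eq_getElem hi, List.getD_eq_getElem?_getD,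
        List.getElem?_eq_getElem hi]
  · have : ¬ i ∈ List.range Num_Boxes.length := by simp [hi]
    simp [this, List.getElem?_eq_none_iff, hi, Nat.le_of_not_lt hi]
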